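-- pv_equiv track=rewrite | github.com/hnimtadd/HCMUT-HK231-DM-BTL-Nhom7 | sort.py | _sortWithFrequent
-- ===== SOURCE A (Python) =====
-- def _frequent(dataset: list[list[list[str]]]) -> dict[str, int]:
--     frequent_dict = dict()  # type:dict[str,int]
--     for lst in dataset:
--         for str in lst:
--             for word in str:
--                 frequent_dict[word] = frequent_dict.get(word, 0) + 1
--     return frequent_dict
--
-- def _sortWithFrequent(
--     dataset: list[list[list[str]]], ascending: bool = True
-- ) -> list[list[list[str]]]:
--     """
--     Sort the dataset by the frequency of each word.
--
--     The result is a dataset in which each sentence has been reordered by word frequency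
--
--     The function will handle list deep copy by itself.
--     """
--     frequent = _frequent(dataset=dataset)
--     [
--         [
--             ele.sort(
--                 key=lambda x: frequent[x] if x in frequent.keys() else 1,
--                 reverse=not ascending,
--             )
--             for ele in lst
--         ]
--         for lst in dataset
--     ]
--     return dataset
-- ===== SOURCE B (Python) =====
-- def _sortWithFrequent(
--     dataset: list[list[list[str]]], ascending: bool = True
-- ) -> list[list[list[str]]]:
--     # Same frequency pass; per-sentence bucket sort (stable) instead of ele.sort(key=...).
--     frequent = {}
--     for lst in dataset:
--         for sentence in lst:
--             for word in sentence:
--                 frequent[word] = frequent.get(word, 0) + 1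
--     for lst in dataset:
--         for ele in lst:
--             buckets = {}
--             for word in ele:
--                 buckets.setdefault(frequent[word], []).append(word)
--             keys = sorted(buckets)
--             if not ascending:
--                 keys.reverse()
--             ele[:] = [word for k in keys for word in buckets[k]]
--     return dataset
-- ===== Notes on version B (the rewrite author's own statement) =====
-- stated objective: alternative
-- what changed: Each sentence's stable key-sort (ele.sort(key=..., reverse=...)) is replaced by a bucket pass: words are grouped by frequency value in appearance order, then the buckets are concatenated in increasing (or decreasing) frequency order.
import Mathlib
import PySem

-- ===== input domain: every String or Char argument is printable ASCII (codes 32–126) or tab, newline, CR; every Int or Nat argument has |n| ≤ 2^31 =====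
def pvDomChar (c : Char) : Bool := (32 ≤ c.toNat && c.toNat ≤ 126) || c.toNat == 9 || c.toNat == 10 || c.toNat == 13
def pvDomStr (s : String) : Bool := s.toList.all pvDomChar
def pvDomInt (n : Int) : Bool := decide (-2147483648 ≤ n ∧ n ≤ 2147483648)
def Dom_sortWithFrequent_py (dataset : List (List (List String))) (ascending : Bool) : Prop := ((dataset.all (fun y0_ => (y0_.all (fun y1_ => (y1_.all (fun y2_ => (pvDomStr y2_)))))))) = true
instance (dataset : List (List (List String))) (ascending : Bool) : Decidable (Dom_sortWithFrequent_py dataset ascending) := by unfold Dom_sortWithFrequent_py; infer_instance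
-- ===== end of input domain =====

-- B replaces each sentence's stable key-sort by a per-sentence bucket pass over frequency values (same counting pass);
-- both Pythons mutate the inner lists in place and return the same dataset object — the equivalence proved is about the return value.

-- ===== PORT A =====
-- helper: the module's _frequent counting pass (byte-identical loop in both Pythons, so shared)
def pyFrequent (dataset : List (List (List String))) : PySem.Dict String Int :=
  dataset.foldl (fun d lst =>
    lst.foldl (fun d s =>
      s.foldl (fun d word => d.insert word (d.getD word 0 + 1)) d) d) PySem.Dict.empty

def sortWithFrequent_py (dataset : List (List (List String))) (ascending : Bool) : List (List (List String)) :=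
  let frequent := pyFrequent dataset
  dataset.map (fun lst => lst.map (fun ele =>
    -- ele.sort(key=lambda x: frequent[x] if x in frequent.keys() else 1, reverse=not ascending)
    -- frequent[x] is guarded by the contains test, so getD x 0 is exact here
    PySem.List.sorted ele
      (fun x => if frequent.contains x then frequent.getD x 0 else 1) (!ascending)))

-- ===== PORT B =====
-- buckets: frequency value ↦ words of the sentence with that frequency, in appearance order
-- (frequent[word] is exact as getD word 0: every word of the sentence is a key of frequent)
def pvBuckets (frequent : PySem.Dict String Int) (ele : List String) : PySem.Dict Int (List String) :=
  ele.foldl (fun b word => b.modify (frequent.getD word 0) [] (fun ws => ws ++ [word])) PySem.Dict.empty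

def pvSortSentence (frequent : PySem.Dict String Int) (ascending : Bool) (ele : List String) : List String :=
  let buckets := pvBuckets frequent ele
  let keys0 := PySem.List.sorted buckets.keys (fun v => v) false
  let keys := if ascending then keys0 else keys0.reverse
  keys.flatMap (fun k => buckets.getD k [])

def sortWithFrequent_py_alt (dataset : List (List (List String))) (ascending : Bool) : List (List (List String)) :=
  let frequent := pyFrequent dataset
  dataset.map (fun lst => lst.map (pvSortSentence frequent ascending))

-- ===== PRECONDITION & SPEC =====
def Spec_sortWithFrequent_py (dataset : List (List (List String))) (ascending : Bool) (out : List (List (List String))) : Prop := out = sortWithFrequent_py_alt dataset ascending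
instance (dataset : List (List (List String))) (ascending : Bool) (out : List (List (List String))) : Decidable (Spec_sortWithFrequent_py dataset ascending out) := by unfold Spec_sortWithFrequent_py; infer_instance

-- ===== CLAIM (what is proved, stated in full; the proofs are below) =====
def Claim_equal_sortWithFrequent_py : Prop := ∀ (dataset : List (List (List String))) (ascending : Bool), Dom_sortWithFrequent_py dataset ascending → Spec_sortWithFrequent_py dataset ascending (sortWithFrequent_py dataset ascending)

-- ===== LEMMAS AND PROOFS =====

-- insertBy walks past a prefix it does not insert before
lemma insertBy_append_of_not_before {α : Type} (before : α → α → Bool) (x : α)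
    (pre suf : List α) (h : ∀ y ∈ pre, before x y = false) :
    PySem.List.insertBy before x (pre ++ suf) = pre ++ PySem.List.insertBy before x suf := by
  induction pre with
  | nil => simp
  | cons y ys ih =>
    have hy : before x y = false := h y (by simp)
    simp [PySem.List.insertBy, hy, ih (fun z hz => h z (by simp [hz]))]

-- insertBy puts x first when it goes before everything
lemma insertBy_cons_of_all_before {α : Type} (before : α → α → Bool) (x : α)
    (suf : List α) (h : ∀ y ∈ suf, before x y = true) :
    PySem.List.insertBy before x suf = x :: suf := by
  cases suf with
  | nil => simp [PySem.List.insertBy]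
  | cons y ys => simp [PySem.List.insertBy, h y (by simp)]

-- inserting x into a bucketed list appends it to its own bucket
lemma insertBy_flatMap {α : Type} (lt : Int → Int → Bool) (key : α → Int)
    (hasym : ∀ a b, lt a b = true → lt b a = false)
    (ks : List Int) (hks : ks.Pairwise (fun a b => lt a b = true))
    (B : Int → List α) (hB : ∀ v ∈ ks, ∀ y ∈ B v, key y = v)
    (x : α) (hx : key x ∈ ks) :
    PySem.List.insertBy (fun a b => lt (key a) (key b)) x (ks.flatMap B)
      = ks.flatMap (fun v => B v ++ if key x == v then [x] else []) := by
  induction ks with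
  | nil => simp at hx
  | cons v ks' ih =>
    have hhead : ∀ w ∈ ks', lt v w = true := (List.pairwise_cons.mp hks).1
    have hks' : ks'.Pairwise (fun a b => lt a b = true) := (List.pairwise_cons.mp hks).2
    have hirr : lt v v = false := by
      cases hlt : lt v v with
      | false => rfl
      | true => exact absurd (hasym v v hlt) (by simp [hlt])
    rw [List.flatMap_cons, List.flatMap_cons]
    by_cases hxv : key x = v
    · -- x belongs to the head bucket: goes after B v, before everything in the tail
      have hpre : ∀ y ∈ B v, (fun a b => lt (key a) (key b)) x y = false := by
        intro y hy
        simp only []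
        rw [hB v (by simp) y hy, hxv, hirr]
      have hsuf : ∀ y ∈ ks'.flatMap B, (fun a b => lt (key a) (key b)) x y = true := by
        intro y hy
        obtain ⟨w, hw, hyw⟩ := List.mem_flatMap.mp hy
        simp only []
        rw [hB w (by simp [hw]) y hyw, hxv]
        exact hhead w hw
      have htail : ks'.flatMap (fun v => B v ++ if key x == v then [x] else [])
          = ks'.flatMap B := by
        apply List.flatMap_congr
        intro w hw
        have hne : key x ≠ w := by
          intro hEq
          have := hhead w hw
          rw [← hEq, hxv] at this
          rw [hirr] at this; exact Bool.false_ne_true this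
        simp [hne]
      rw [insertBy_append_of_not_before _ _ _ _ hpre,
          insertBy_cons_of_all_before _ _ _ hsuf, htail]
      have hxvb : (key x == v) = true := by simpa using hxv
      simp [hxvb]
    · -- x belongs to a later bucket
      have hx' : key x ∈ ks' := by
        rcases List.mem_cons.mp hx with h | h
        · exact absurd h hxv
        · exact h
      have hpre : ∀ y ∈ B v, (fun a b => lt (key a) (key b)) x y = false := by
        intro y hy
        simp only []
        rw [hB v (by simp) y hy]
        exact hasym _ _ (hhead _ hx')
      rw [insertBy_append_of_not_before _ _ _ _ hpre,
          ih hks' (fun w hw y hy => hB w (by simp [hw]) y hy) hx']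
      have hxvb : (key x == v) = false := by simpa using hxv
      simp [hxvb]

-- the stable insertion-sort loop produces the bucketed concatenation
lemma foldl_insertBy_buckets {α : Type} (lt : Int → Int → Bool) (key : α → Int)
    (hasym : ∀ a b, lt a b = true → lt b a = false)
    (ks : List Int) (hks : ks.Pairwise (fun a b => lt a b = true))
    (l : List α) (hl : ∀ x ∈ l, key x ∈ ks) :
    l.foldl (fun acc x => PySem.List.insertBy (fun a b => lt (key a) (key b)) x acc) []
      = ks.flatMap (fun v => l.filter (fun x => key x == v)) := by
  induction l using List.reverseRecOn with
  | nil => simp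
  | append_singleton l x ih =>
    rw [List.foldl_append, List.foldl_cons, List.foldl_nil,
        ih (fun y hy => hl y (by simp [hy])),
        insertBy_flatMap lt key hasym ks hks _
          (fun v hv y hy => by simpa using (List.of_mem_filter hy))
          x (hl x (by simp))]
    apply List.flatMap_congr
    intro v hv
    rw [List.filter_append, List.filter_singleton]
    simp

-- Python's stable sorted(·, key, reverse) IS the concatenation of frequency buckets
lemma sorted_eq_buckets {α : Type} (l : List α) (key : α → Int) (rev : Bool) :
    PySem.List.sorted l key rev =
      ((if rev then (PySem.List.sorted (PySem.List.dedup (l.map key)) (fun v => v) false).reverse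
                else PySem.List.sorted (PySem.List.dedup (l.map key)) (fun v => v) false)).flatMap
        (fun v => l.filter (fun x => key x == v)) := by
  have hstrict : (PySem.List.sorted (PySem.List.dedup (l.map key)) (fun v => v) false).Pairwise (· < ·) := by
    rw [PySem.List.dedup_eq_ofList]
    exact PySem.List.sorted_ofList_pairwise_lt (l.map key)
  have hmem : ∀ x ∈ l, key x ∈ PySem.List.sorted (PySem.List.dedup (l.map key)) (fun v => v) false := by
    intro x hx
    rw [PySem.List.mem_sorted, PySem.List.mem_dedup]
    exact List.mem_map.mpr ⟨x, hx, rfl⟩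
  cases rev with
  | false =>
    rw [PySem.List.sorted_eq_foldl_insertBy]
    exact foldl_insertBy_buckets (fun a b => decide (a < b)) key
      (by intro a b h; simp at h ⊢; omega)
      _ (hstrict.imp (by intro a b h; simpa using h))
      l hmem
  | true =>
    rw [PySem.List.sorted_rev_eq_foldl_insertBy]
    exact foldl_insertBy_buckets (fun a b => decide (b < a)) key
      (by intro a b h; simp at h ⊢; omega)
      _ (List.pairwise_reverse.mpr (hstrict.imp (by intro a b h; simpa using h)))
      l (fun x hx => by simpa using hmem x hx)

-- keys of the bucket dict are the distinct frequency values in first-appearance order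
lemma keys_bucketsAux (key : String → Int) :
    ∀ (l : List String) (d : PySem.Dict Int (List String)),
      (l.foldl (fun b w => b.modify (key w) [] (fun ws => ws ++ [w])) d).keys
        = l.foldl (fun s w => PySem.Set.add s (key w)) d.keys := by
  intro l
  induction l with
  | nil => intro d; rfl
  | cons w l ih =>
    intro d
    simp only [List.foldl_cons]
    rw [ih]
    congr 1
    rw [PySem.Dict.keys_modify]
    by_cases hc : d.contains (key w) = true
    · rw [PySem.Dict.keys_insert_of_contains _ _ hc,
          PySem.Set.add_of_mem ((PySem.Dict.contains_iff_mem_keys _ _).mp hc)]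
    · have hc' : d.contains (key w) = false := by simpa using hc
      rw [PySem.Dict.keys_insert_of_not_contains _ _ hc',
          PySem.Set.add_of_not_mem (fun hm => hc ((PySem.Dict.contains_iff_mem_keys _ _).mpr hm))]

lemma keys_pvBuckets (frequent : PySem.Dict String Int) (ele : List String) :
    (pvBuckets frequent ele).keys = PySem.List.dedup (ele.map (fun w => frequent.getD w 0)) := by
  unfold pvBuckets
  rw [keys_bucketsAux (fun w => frequent.getD w 0) ele PySem.Dict.empty,
      PySem.Dict.keys_empty, PySem.List.dedup_eq_ofList, PySem.Set.ofList_eq_foldl,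
      List.foldl_map]

-- each bucket holds exactly the words of that frequency, in order
lemma getD_bucketsAux (key : String → Int) :
    ∀ (l : List String) (d : PySem.Dict Int (List String)) (v : Int),
      (l.foldl (fun b w => b.modify (key w) [] (fun ws => ws ++ [w])) d).getD v []
        = d.getD v [] ++ l.filter (fun w => key w == v) := by
  intro l
  induction l with
  | nil => intro d v; simp
  | cons w l ih =>
    intro d v
    simp only [List.foldl_cons]
    rw [ih]
    by_cases hv : v = key w
    · have hb : (key w == v) = true := by simpa using hv.symm
      rw [List.filter_cons]
      simp only [hb]
      rw [PySem.Dict.getD_modify]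
      simp [hv]
    · have hb : (key w == v) = false := by simpa using (fun h => hv h.symm)
      rw [List.filter_cons]
      simp only [hb]
      rw [PySem.Dict.getD_modify]
      simp [hv]

lemma getD_pvBuckets (frequent : PySem.Dict String Int) (ele : List String) (v : Int) :
    (pvBuckets frequent ele).getD v [] = ele.filter (fun w => frequent.getD w 0 == v) := by
  unfold pvBuckets
  rw [getD_bucketsAux (fun w => frequent.getD w 0) ele PySem.Dict.empty v]
  simp

-- the per-sentence equality: A's stable sort = B's bucket concatenation
lemma sentence_eq (frequent : PySem.Dict String Int) (ascending : Bool) (ele : List String)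
    (hc : ∀ x ∈ ele, frequent.contains x = true) :
    PySem.List.sorted ele (fun x => if frequent.contains x then frequent.getD x 0 else 1) (!ascending)
      = pvSortSentence frequent ascending ele := by
  have hkey : ∀ x ∈ ele, (if frequent.contains x then frequent.getD x 0 else 1) = frequent.getD x 0 := by
    intro x hx; rw [hc x hx]; simp
  have hmap : ele.map (fun x => if frequent.contains x then frequent.getD x 0 else 1)
      = ele.map (fun w => frequent.getD w 0) := List.map_congr_left hkey
  rw [sorted_eq_buckets, hmap]
  simp only [pvSortSentence, keys_pvBuckets]
  cases ascending with
  | true =>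
    simp only [Bool.not_true, reduceIte]
    apply List.flatMap_congr
    intro v hv
    rw [getD_pvBuckets]
    exact List.filter_congr (fun x hx => by rw [hkey x hx])
  | false =>
    simp only [Bool.not_false, reduceIte]
    apply List.flatMap_congr
    intro v hv
    rw [getD_pvBuckets]
    exact List.filter_congr (fun x hx => by rw [hkey x hx])

-- every word of the dataset is a key of the frequency dict
lemma contains_words :
    ∀ (ws : List String) (d : PySem.Dict String Int) (w : String),
      (d.contains w = true ∨ w ∈ ws) →
      (ws.foldl (fun d word => d.insert word (d.getD word 0 + 1)) d).contains w = true := by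
  intro ws
  induction ws with
  | nil => intro d w h; simpa using h.resolve_right (by simp)
  | cons a ws ih =>
    intro d w h
    simp only [List.foldl_cons]
    apply ih
    rcases h with h | h
    · left; rw [PySem.Dict.contains_insert]; simp [h]
    · rcases List.mem_cons.mp h with rfl | h2
      · left; rw [PySem.Dict.contains_insert]; simp
      · right; exact h2

lemma contains_sentences :
    ∀ (lst : List (List String)) (d : PySem.Dict String Int) (w : String),
      (d.contains w = true ∨ ∃ s ∈ lst, w ∈ s) →
      (lst.foldl (fun d s => s.foldl (fun d word => d.insert word (d.getD word 0 + 1)) d) d).contains w = true := by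
  intro lst
  induction lst with
  | nil => intro d w h; simpa using h.resolve_right (by simp)
  | cons a lst ih =>
    intro d w h
    simp only [List.foldl_cons]
    apply ih
    rcases h with h | ⟨s, hs, hw⟩
    · left; exact contains_words a d w (Or.inl h)
    · rcases List.mem_cons.mp hs with rfl | h2
      · left; exact contains_words s d w (Or.inr hw)
      · right; exact ⟨s, h2, hw⟩

lemma contains_pyFrequent :
    ∀ (dataset : List (List (List String))) (d : PySem.Dict String Int) (w : String),
      (d.contains w = true ∨ ∃ lst ∈ dataset, ∃ s ∈ lst, w ∈ s) →
      (dataset.foldl (fun d lst =>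
        lst.foldl (fun d s => s.foldl (fun d word => d.insert word (d.getD word 0 + 1)) d) d) d).contains w = true := by
  intro dataset
  induction dataset with
  | nil => intro d w h; simpa using h.resolve_right (by simp)
  | cons a dataset ih =>
    intro d w h
    simp only [List.foldl_cons]
    apply ih
    rcases h with h | ⟨lst, hlst, s, hs, hw⟩
    · left; exact contains_sentences a d w (Or.inl h)
    · rcases List.mem_cons.mp hlst with rfl | h2
      · left; exact contains_sentences lst d w (Or.inr ⟨s, hs, hw⟩)
      · right; exact ⟨lst, h2, s, hs, hw⟩

-- ===== VERDICT (by name: the statement is the Claim_ definition above) =====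
theorem sortWithFrequent_py_spec : Claim_equal_sortWithFrequent_py := by
  intro dataset ascending _hdom
  unfold Spec_sortWithFrequent_py sortWithFrequent_py sortWithFrequent_py_alt
  apply List.map_congr_left
  intro lst hlst
  apply List.map_congr_left
  intro ele hele
  apply sentence_eq
  intro x hx
  exact contains_pyFrequent dataset PySem.Dict.empty x (Or.inr ⟨lst, hlst, ele, hele, hx⟩)
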